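-- pv_equiv track=rewrite | github.com/Narendra725/pyspark_labs | Power BI/Automations/Power Bi Desktop/base_articrafts/functions.py | get_module_btn_pos
-- ===== SOURCE A (Python) =====
-- def get_module_btn_pos(report_struct):
--     def change(x,y,z):
--         return (304,y+83,z+500)
--     def right(x,y,z):
--         return (703,y,z+100)
--     mod_btn_pos = {}
--     i = 0
--     x= 304
--     y= 360
--     z= 4000
--     for chapter in report_struct.keys():
--         pos =  {
--                 "x": 304,
--                 "y": 360,
--                 "z": 4000,
--                 "width": 270,
--                 "height": 70,
--                 "tabOrder": 4000
--                }
--         pos["x"]= x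
--         pos["y"]= y
--         pos["z"]=pos["tabOrder"]=z
--         mod_btn_pos[chapter]=pos
--         if i % 2 == 0:
--             x,y,z=right(x,y,z)
--         else:
--             x,y,z=change(x,y,z)
--         i+=1
--     return mod_btn_pos
-- ===== SOURCE B (Python) =====
-- def get_module_btn_pos(report_struct):
--     def pos(i):
--         z = 4000 + 100 * ((i + 1) // 2) + 500 * (i // 2)
--         return {
--             "x": 304 if i % 2 == 0 else 703,
--             "y": 360 + 83 * (i // 2),
--             "z": z,
--             "width": 270,
--             "height": 70,
--             "tabOrder": z,
--         }
--     return {chapter: pos(i) for i, chapter in enumerate(report_struct)}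
-- ===== Notes on version B (the rewrite author's own statement) =====
-- stated objective: simpler
-- what changed: Replaces A's sequential mutable x/y/z/i state machine (alternating right/change updates per iteration) with a stateless closed-form position computed directly from each chapter's index via a dict comprehension.
import Mathlib
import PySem

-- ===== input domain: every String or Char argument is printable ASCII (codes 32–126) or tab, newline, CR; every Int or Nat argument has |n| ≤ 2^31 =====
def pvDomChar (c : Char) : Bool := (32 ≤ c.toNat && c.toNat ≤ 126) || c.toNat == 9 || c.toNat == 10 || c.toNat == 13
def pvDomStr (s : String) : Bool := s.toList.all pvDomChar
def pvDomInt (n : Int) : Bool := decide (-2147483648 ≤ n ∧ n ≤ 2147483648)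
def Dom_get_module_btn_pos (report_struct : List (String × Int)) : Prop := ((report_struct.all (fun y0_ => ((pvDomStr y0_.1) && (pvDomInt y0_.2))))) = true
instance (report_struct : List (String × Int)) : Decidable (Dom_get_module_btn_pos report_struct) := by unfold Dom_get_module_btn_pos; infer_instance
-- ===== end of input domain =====

-- B replaces A's running x/y/z/i state machine with a stateless closed-form position per index (objective: simpler).

-- ===== PORT A =====
def pvChange (x y z : Int) : Int × Int × Int := (304, y + 83, z + 500)

def pvRight (x y z : Int) : Int × Int × Int := (703, y, z + 100)

def pvStepA (st : PySem.Dict String (List (String × Int)) × Int × Int × Int × Int)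
    (chapter : String) : PySem.Dict String (List (String × Int)) × Int × Int × Int × Int :=
  let d := st.1
  let i := st.2.1
  let x := st.2.2.1
  let y := st.2.2.2.1
  let z := st.2.2.2.2
  let pos : PySem.Dict String Int :=
    PySem.Dict.ofList [("x", 304), ("y", 360), ("z", 4000), ("width", 270), ("height", 70), ("tabOrder", 4000)]
  let pos := pos.insert "x" x
  let pos := pos.insert "y" y
  -- pos["z"] = pos["tabOrder"] = z  (chained assignment: both keys get z; both already present)
  let pos := pos.insert "z" z
  let pos := pos.insert "tabOrder" z
  let d := d.insert chapter pos.items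
  if PySem.Int.mod i 2 == 0 then
    let r := pvRight x y z
    (d, i + 1, r.1, r.2.1, r.2.2)
  else
    let r := pvChange x y z
    (d, i + 1, r.1, r.2.1, r.2.2)

def get_module_btn_pos (report_struct : List (String × Int)) : List (String × List (String × Int)) :=
  (((PySem.Dict.ofList report_struct).keys).foldl pvStepA
    (PySem.Dict.empty, 0, 304, 360, 4000)).1.items

-- ===== PORT B =====
def pvPosB (i : Int) : List (String × Int) :=
  let z := 4000 + 100 * PySem.Int.floordiv (i + 1) 2 + 500 * PySem.Int.floordiv i 2
  [("x", if PySem.Int.mod i 2 == 0 then 304 else 703),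
   ("y", 360 + 83 * PySem.Int.floordiv i 2),
   ("z", z), ("width", 270), ("height", 70), ("tabOrder", z)]

def get_module_btn_pos_alt (report_struct : List (String × Int)) : List (String × List (String × Int)) :=
  ((PySem.List.enumerate ((PySem.Dict.ofList report_struct).keys)).foldl
    (fun d p => d.insert p.2 (pvPosB p.1)) PySem.Dict.empty).items

-- ===== PRECONDITION & SPEC =====
def Spec_get_module_btn_pos (report_struct : List (String × Int)) (out : List (String × List (String × Int))) : Prop := out = get_module_btn_pos_alt report_struct
instance (report_struct : List (String × Int)) (out : List (String × List (String × Int))) : Decidable (Spec_get_module_btn_pos report_struct out) := by unfold Spec_get_module_btn_pos; infer_instance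

-- ===== CLAIM (what is proved, stated in full; the proofs are below) =====
def Claim_equal_get_module_btn_pos : Prop := ∀ (report_struct : List (String × Int)), Dom_get_module_btn_pos report_struct → Spec_get_module_btn_pos report_struct (get_module_btn_pos report_struct)

-- ===== LEMMAS AND PROOFS =====
def pvX (n : Nat) : Int := if n % 2 = 0 then 304 else 703
def pvY (n : Nat) : Int := 360 + 83 * ((n / 2 : Nat) : Int)
def pvZ (n : Nat) : Int := 4000 + 100 * (((n + 1) / 2 : Nat) : Int) + 500 * ((n / 2 : Nat) : Int)

theorem pvPosB_natCast (n : Nat) :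
    pvPosB (n : Int) =
      [("x", pvX n), ("y", pvY n), ("z", pvZ n), ("width", 270), ("height", 70), ("tabOrder", pvZ n)] := by
  have h1 : ((n : Int) + 1) = ((n + 1 : Nat) : Int) := by push_cast; ring
  simp only [pvPosB, pvX, pvY, pvZ, h1]
  by_cases h : n % 2 = 0 <;> simp [h] <;> omega

theorem pvStepA_eq (d : PySem.Dict String (List (String × Int))) (n : Nat) (ch : String) :
    pvStepA (d, (n : Int), pvX n, pvY n, pvZ n) ch =
      (d.insert ch (pvPosB (n : Int)), ((n + 1 : Nat) : Int), pvX (n + 1), pvY (n + 1), pvZ (n + 1)) := by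
  rw [pvPosB_natCast]
  have hm : PySem.Int.mod (n : Int) 2 = (n : Int) % 2 :=
    PySem.Int.mod_eq_emod_of_pos (by norm_num)
  simp only [pvStepA, pvRight, pvChange, hm]
  by_cases h : n % 2 = 0
  · have hb : (((n : Int) % 2) == 0) = true := by simp only [beq_iff_eq]; omega
    simp only [hb, if_true, Prod.mk.injEq]
    refine ⟨rfl, by push_cast; ring, ?_, ?_, ?_⟩ <;>
      simp only [pvX, pvY, pvZ] <;> (try split_ifs) <;> omega
  · have hb : (((n : Int) % 2) == 0) = false := by simp only [beq_eq_false_iff_ne]; omega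
    simp only [hb, Bool.false_eq_true, if_false, Prod.mk.injEq]
    refine ⟨rfl, by push_cast; ring, ?_, ?_, ?_⟩ <;>
      simp only [pvX, pvY, pvZ] <;> (try split_ifs) <;> omega

theorem pvLoop_eq (ks : List String) : ∀ (n : Nat) (d : PySem.Dict String (List (String × Int))),
    (ks.foldl pvStepA (d, (n : Int), pvX n, pvY n, pvZ n)).1 =
      (PySem.List.enumerate ks (n : Int)).foldl (fun d p => d.insert p.2 (pvPosB p.1)) d := by
  induction ks with
  | nil => intro n d; simp [PySem.List.enumerate_nil]
  | cons k ks ih =>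
    intro n d
    rw [PySem.List.enumerate_cons]
    simp only [List.foldl_cons, pvStepA_eq]
    have := ih (n + 1) (d.insert k (pvPosB (n : Int)))
    push_cast at this
    exact this

-- ===== VERDICT (by name: the statement is the Claim_ definition above) =====
theorem get_module_btn_pos_spec : Claim_equal_get_module_btn_pos := by
  intro rs _
  show get_module_btn_pos rs = get_module_btn_pos_alt rs
  unfold get_module_btn_pos get_module_btn_pos_alt
  have h := pvLoop_eq ((PySem.Dict.ofList rs).keys) 0 PySem.Dict.empty
  simp only [pvX, pvY, pvZ] at h
  norm_num at h
  exact congrArg PySem.Dict.items h
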